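-- pv_equiv track=rewrite | github.com/fortran95/postoffice | _util.py | splitjsons
-- ===== SOURCE A (Python) =====
-- def splitjsons(text):
--     ret = []
--     text = text.strip()
--     unbalance = 0
--     starts = '{[('
--     ends   = '}])'
--     i      = 0
--     while text != '':
--         if text[i] in starts:
--             unbalance += 1
--         elif text[i] in ends:
--             unbalance -= 1
--         i += 1
--         if unbalance == 0:
--             got = text[0:i]
--             if got[0] in starts and got[-1] in ends:
--                 ret.append(got)
--             text = text[i:].strip()
--             i = 0
--     return ret
-- ===== SOURCE B (Python) =====
-- def splitjsons(text):
--     ret = []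
--     starts = '{[('
--     ends = '}])'
--     bal = 0
--     cur = []
--     for c in text:
--         if not cur and c.isspace():
--             continue
--         cur.append(c)
--         if c in starts:
--             bal += 1
--         elif c in ends:
--             bal -= 1
--         if bal == 0:
--             if cur[0] in starts and cur[-1] in ends:
--                 ret.append(''.join(cur))
--             cur = []
--     return ret
-- ===== Notes on version B (the rewrite author's own statement) =====
-- stated objective: faster
-- what changed: B replaces A's while-loop that repeatedly re-slices and re-strips the remaining string (text = text[i:].strip(), restarting the index) with a single forward pass over the characters that keeps a running bracket balance and accumulates the current chunk, so no quadratic re-slicing occurs.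
import Mathlib
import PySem

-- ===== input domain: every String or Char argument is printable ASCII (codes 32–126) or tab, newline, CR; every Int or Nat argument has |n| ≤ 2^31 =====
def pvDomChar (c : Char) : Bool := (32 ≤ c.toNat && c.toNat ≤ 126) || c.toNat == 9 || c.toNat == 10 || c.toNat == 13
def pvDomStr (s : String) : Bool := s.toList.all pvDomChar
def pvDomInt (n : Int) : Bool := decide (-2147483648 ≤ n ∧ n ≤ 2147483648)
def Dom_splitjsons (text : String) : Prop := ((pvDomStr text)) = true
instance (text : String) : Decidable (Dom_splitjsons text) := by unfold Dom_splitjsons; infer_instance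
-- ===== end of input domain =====

-- B replaces A's quadratic re-slice-and-strip while-loop by one forward pass with a running
-- bracket balance and an accumulated current chunk (objective: faster, asymptotically).

-- ===== PORT A =====
-- c in '{[(' / c in '}])' (single-character membership in the two literal bracket strings)
def pvIsOpen (c : Char) : Bool := c == '{' || c == '[' || c == '('
def pvIsClose (c : Char) : Bool := c == '}' || c == ']' || c == ')'

-- needed by loopA's termination proof (cited in decreasing_by)
theorem pvStrip_length_le (s : List Char) : (PySem.Chars.strip s).length ≤ s.length := by
  simp only [PySem.Chars.strip, PySem.Chars.rstrip, PySem.Chars.lstrip]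
  have h1 := List.length_dropWhile_le (p := PySem.Chars.isspace)
      (l := (List.dropWhile PySem.Chars.isspace s).reverse)
  have h2 := List.length_dropWhile_le (p := PySem.Chars.isspace) (l := s)
  simp only [List.length_reverse] at *
  omega

-- A's while-loop: state = (current stripped text t, index i, unbalance u, accumulated ret);
-- t[i] out of range is Python's IndexError (A raises there; outside Pre_ below, port returns ret)
def pvLoopA (t : List Char) (i : Nat) (u : Int) (ret : List String) : List String :=
  if t = [] then ret
  else
    match h : t[i]? with
    | none => ret  -- IndexError in Python A; excluded by Pre_
    | some c =>
      let u' := if pvIsOpen c then u + 1 else if pvIsClose c then u - 1 else u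
      if u' = 0 then
        let got := t.take (i + 1)
        let ret' := if pvIsOpen (PySem.List.pyGetD got 0 ' ')
                      && pvIsClose (PySem.List.pyGetD got (-1) ' ')
                    then ret ++ [String.ofList got] else ret
        pvLoopA (PySem.Chars.strip (t.drop (i + 1))) 0 0 ret'
      else pvLoopA t (i + 1) u' ret
termination_by t.length - i
decreasing_by
  · have hi : i < t.length := by
      by_contra hge
      simp [List.getElem?_eq_none (by omega : t.length ≤ i)] at h
    have := pvStrip_length_le (t.drop (i + 1))
    simp only [List.length_drop] at this
    omega
  · have hi : i < t.length := by
      by_contra hge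
      simp [List.getElem?_eq_none (by omega : t.length ≤ i)] at h
    omega

def splitjsons (text : String) : List String :=
  pvLoopA (PySem.Chars.strip text.toList) 0 0 []

-- ===== PORT B =====
-- one pass: r = remaining chars, cur = current chunk, bal = running balance, ret = output
def pvLoopB (r : List Char) (cur : List Char) (bal : Int) (ret : List String) : List String :=
  match r with
  | [] => ret
  | c :: r' =>
    if cur = [] ∧ PySem.Chars.isspace c then pvLoopB r' cur bal ret
    else
      let cur' := cur ++ [c]
      let bal' := if pvIsOpen c then bal + 1 else if pvIsClose c then bal - 1 else bal
      if bal' = 0 then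
        let ret' := if pvIsOpen (PySem.List.pyGetD cur' 0 ' ')
                      && pvIsClose (PySem.List.pyGetD cur' (-1) ' ')
                    then ret ++ [String.ofList cur'] else ret
        pvLoopB r' [] bal' ret'
      else pvLoopB r' cur' bal' ret

def splitjsons_alt (text : String) : List String :=
  pvLoopB text.toList [] 0 []

-- ===== PRECONDITION & SPEC =====
def pvBalance (s : List Char) : Int :=
  (s.map fun c => if pvIsOpen c then (1 : Int) else if pvIsClose c then -1 else 0).sum

-- Pre_ excludes exactly the inputs on which Python A raises IndexError: those whose total
-- bracket balance is nonzero (A's index then runs past the end of the string).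
def Pre_splitjsons (text : String) : Prop := pvBalance text.toList = 0
instance (text : String) : Decidable (Pre_splitjsons text) := by unfold Pre_splitjsons; infer_instance
def pvWitness_splitjsons : String := "{\"a\": 1} [2, 3]"

def Spec_splitjsons (text : String) (out : List String) : Prop := out = splitjsons_alt text
instance (text : String) (out : List String) : Decidable (Spec_splitjsons text out) := by unfold Spec_splitjsons; infer_instance

-- ===== CLAIM (what is proved, stated in full; the proofs are below) =====
def Claim_equal_splitjsons : Prop := ∀ (text : String), Dom_splitjsons text → Pre_splitjsons text → Spec_splitjsons text (splitjsons text)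

-- ===== LEMMAS AND PROOFS =====

-- unfolding lemmas for A's well-founded loop
theorem pvLoopA_nil (i : Nat) (u : Int) (ret : List String) : pvLoopA [] i u ret = ret := by
  rw [pvLoopA]; simp

theorem pvLoopA_oob (t : List Char) (i : Nat) (u : Int) (ret : List String)
    (ht : t ≠ []) (h : t.length ≤ i) : pvLoopA t i u ret = ret := by
  rw [pvLoopA, if_neg ht]
  split
  · rfl
  · next c heq => rw [List.getElem?_eq_none h] at heq; cases heq

theorem pvLoopA_some (t : List Char) (i : Nat) (u : Int) (ret : List String) (c : Char)
    (ht : t ≠ []) (hc : t[i]? = some c) :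
    pvLoopA t i u ret =
      (if (if pvIsOpen c then u + 1 else if pvIsClose c then u - 1 else u) = 0 then
        pvLoopA (PySem.Chars.strip (t.drop (i + 1))) 0 0
          (if pvIsOpen (PySem.List.pyGetD (t.take (i + 1)) 0 ' ')
              && pvIsClose (PySem.List.pyGetD (t.take (i + 1)) (-1) ' ')
           then ret ++ [String.ofList (t.take (i + 1))] else ret)
      else pvLoopA t (i + 1) (if pvIsOpen c then u + 1 else if pvIsClose c then u - 1 else u) ret) := by
  rw [pvLoopA, if_neg ht]
  split
  · next heq => rw [hc] at heq; cases heq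
  · next c' heq => rw [hc] at heq; cases heq; rfl

-- a bracket character is never whitespace
theorem pvBracket_not_space (c : Char)
    (h : pvIsOpen c = true ∨ pvIsClose c = true) : PySem.Chars.isspace c = false := by
  rcases h with h | h <;>
  · simp only [pvIsOpen, pvIsClose, Bool.or_eq_true, beq_iff_eq] at h
    rcases h with (h | h) | h <;> subst h <;> decide

-- B ignores a trailing all-whitespace run while a chunk with nonzero balance is open
theorem pvLoopB_ws_tail (tail : List Char) (cur : List Char) (u : Int) (ret : List String)
    (hws : ∀ c ∈ tail, PySem.Chars.isspace c = true) (hu : u ≠ 0) :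
    pvLoopB tail cur u ret = ret := by
  induction tail generalizing cur with
  | nil => simp [pvLoopB]
  | cons c tl ih =>
    have hc : PySem.Chars.isspace c = true := hws c (by simp)
    have hws' : ∀ x ∈ tl, PySem.Chars.isspace x = true := fun x hx => hws x (by simp [hx])
    rw [pvLoopB]
    by_cases hcur : cur = []
    · rw [if_pos ⟨hcur, hc⟩]
      exact ih cur hws'
    · rw [if_neg (by simp [hcur])]
      have hop : pvIsOpen c = false := by
        cases hb : pvIsOpen c
        · rfl
        · rw [pvBracket_not_space c (Or.inl hb)] at hc; cases hc
      have hcl : pvIsClose c = false := by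
        cases hb : pvIsClose c
        · rfl
        · rw [pvBracket_not_space c (Or.inr hb)] at hc; cases hc
      simp only [hop, hcl, Bool.false_eq_true, if_false, if_neg hu]
      exact ih (cur ++ [c]) hws'

-- B skips a leading all-whitespace run when no chunk is open
theorem pvLoopB_ws_skip (w r : List Char) (u : Int) (ret : List String)
    (hws : ∀ c ∈ w, PySem.Chars.isspace c = true) :
    pvLoopB (w ++ r) [] u ret = pvLoopB r [] u ret := by
  induction w with
  | nil => rfl
  | cons c tl ih =>
    have hc : PySem.Chars.isspace c = true := hws c (by simp)
    rw [List.cons_append, pvLoopB, if_pos ⟨rfl, hc⟩]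
    exact ih (fun x hx => hws x (by simp [hx]))

-- strip s cuts s into whitespace ++ strip s ++ whitespace
theorem pvStrip_decomp (s : List Char) :
    ∃ w w2, s = w ++ PySem.Chars.strip s ++ w2 ∧
      (∀ c ∈ w, PySem.Chars.isspace c = true) ∧ (∀ c ∈ w2, PySem.Chars.isspace c = true) := by
  refine ⟨s.takeWhile PySem.Chars.isspace,
          ((List.dropWhile PySem.Chars.isspace s).reverse.takeWhile PySem.Chars.isspace).reverse,
          ?_, ?_, ?_⟩
  · rw [List.append_assoc]
    simp only [PySem.Chars.strip, PySem.Chars.rstrip, PySem.Chars.lstrip]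
    conv_lhs => rw [← List.takeWhile_append_dropWhile (p := PySem.Chars.isspace) (l := s)]
    congr 1
    conv_lhs => rw [← List.reverse_reverse (List.dropWhile PySem.Chars.isspace s),
      ← List.takeWhile_append_dropWhile (p := PySem.Chars.isspace)
        (l := (List.dropWhile PySem.Chars.isspace s).reverse)]
    rw [List.reverse_append]
  · intro c hc; exact List.mem_takeWhile_imp hc
  · intro c hc
    rw [List.mem_reverse] at hc; exact List.mem_takeWhile_imp hc

-- head? of dropWhile p never satisfies p
theorem pvHead?_dropWhile (p : Char → Bool) (l : List Char) (c : Char)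
    (h : (l.dropWhile p).head? = some c) : p c = false := by
  induction l with
  | nil => cases h
  | cons a tl ih =>
    rw [List.dropWhile_cons] at h
    split at h
    · exact ih h
    · next hp =>
      simp only [List.head?_cons, Option.some.injEq] at h
      subst h
      simpa using hp

-- the first character of a stripped string is not whitespace
theorem pvStrip_head (s : List Char) (c : Char)
    (h : (PySem.Chars.strip s).head? = some c) : PySem.Chars.isspace c = false := by
  simp only [PySem.Chars.strip, PySem.Chars.rstrip, PySem.Chars.lstrip] at h
  set x := List.dropWhile PySem.Chars.isspace s with hx
  have hpre : (List.dropWhile PySem.Chars.isspace x.reverse).reverse <+: x := by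
    conv_rhs => rw [← List.reverse_reverse x,
      ← List.takeWhile_append_dropWhile (p := PySem.Chars.isspace) (l := x.reverse)]
    rw [List.reverse_append]
    exact List.prefix_append _ _
  obtain ⟨t, ht⟩ := hpre
  have hcx : x.head? = some c := by
    rw [← ht, List.head?_append, h]; rfl
  rw [hx] at hcx
  exact pvHead?_dropWhile _ _ _ hcx

-- main invariant: A's loop at state (t, i, u, ret) equals B's pass with
-- remaining = t.drop i ++ trailing whitespace and current chunk = t.take i
theorem pvMain (n : Nat) (t : List Char) (i : Nat) (u : Int) (ret : List String)
    (tail : List Char)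
    (hn : t.length - i + tail.length ≤ n)
    (hi : i ≤ t.length)
    (hws : ∀ c ∈ tail, PySem.Chars.isspace c = true)
    (hu : 0 < i → u ≠ 0)
    (hh : ∀ c, t.head? = some c → PySem.Chars.isspace c = false) :
    pvLoopA t i u ret = pvLoopB (t.drop i ++ tail) (t.take i) u ret := by
  induction n generalizing t i u ret tail with
  | zero =>
    have hti : t.length ≤ i := by omega
    have htl : tail = [] := by
      cases tail with
      | nil => rfl
      | cons a b => simp only [List.length_cons] at hn; omega
    subst htl
    cases ht : t with
    | nil => simp [pvLoopA_nil, pvLoopB, List.drop_nil, List.take_nil]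
    | cons a b =>
      rw [← ht, pvLoopA_oob t i u ret (by simp [ht]) hti,
        List.drop_of_length_le hti, List.nil_append]
      have hibig : 0 < i := by rw [ht] at hti; simp at hti; omega
      rw [pvLoopB_ws_tail [] _ u ret (by simp) (hu hibig)]
  | succ m ih =>
    by_cases ht : t = []
    · subst ht
      simp only [List.length_nil, Nat.le_zero] at hi
      subst hi
      rw [pvLoopA_nil, List.drop_nil, List.take_nil, List.nil_append,
        ← List.append_nil tail, pvLoopB_ws_skip tail [] u ret hws]
      rfl
    · by_cases hilt : i < t.length
      · -- in-range step
        have hget : t[i]? = some t[i] := List.getElem?_eq_getElem hilt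
        set c := t[i] with hcdef
        rw [pvLoopA_some t i u ret c ht hget]
        have hdrop : t.drop i = c :: t.drop (i + 1) := List.drop_eq_getElem_cons hilt
        have htake : t.take (i + 1) = t.take i ++ [c] := by
          rw [List.take_add_one, hget]; rfl
        rw [hdrop, List.cons_append, pvLoopB]
        have hnoskip : ¬(t.take i = [] ∧ PySem.Chars.isspace c = true) := by
          rintro ⟨h1, h2⟩
          have hi0 : i = 0 := by
            by_contra h0
            rw [List.take_eq_nil_iff] at h1
            rcases h1 with h1 | h1
            · exact h0 h1
            · exact ht h1
          subst hi0
          have hhd : t.head? = some c := by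
            cases hte : t with
            | nil => exact absurd hte ht
            | cons a b => rw [hcdef]; simp [hte]
          rw [hh c hhd] at h2; cases h2
        rw [if_neg hnoskip]
        simp only [← htake]
        by_cases hu0 : (if pvIsOpen c then u + 1 else if pvIsClose c then u - 1 else u) = 0
        · -- cut: a chunk ends here
          rw [if_pos hu0, if_pos hu0, hu0]
          set ret' := if pvIsOpen (PySem.List.pyGetD (t.take (i + 1)) 0 ' ')
                        && pvIsClose (PySem.List.pyGetD (t.take (i + 1)) (-1) ' ')
                      then ret ++ [String.ofList (t.take (i + 1))] else ret with hret'
          obtain ⟨w, w2, hdec, hw, hw2⟩ := pvStrip_decomp (t.drop (i + 1))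
          have hlen : w.length + ((PySem.Chars.strip (t.drop (i + 1))).length + w2.length)
              = t.length - (i + 1) := by
            have := congrArg List.length hdec
            simp only [List.length_append, List.length_drop] at this
            omega
          calc pvLoopA (PySem.Chars.strip (t.drop (i + 1))) 0 0 ret'
              = pvLoopB ((PySem.Chars.strip (t.drop (i + 1))).drop 0 ++ (w2 ++ tail))
                  ((PySem.Chars.strip (t.drop (i + 1))).take 0) 0 ret' := by
                apply ih _ _ _ _ _ (by simp only [List.length_append, Nat.sub_zero]; omega)
                  (by omega)
                  (by intro x hx; rcases List.mem_append.mp hx with h | h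
                      exacts [hw2 x h, hws x h])
                  (by omega)
                  (fun x hx => pvStrip_head _ x hx)
            _ = pvLoopB (t.drop (i + 1) ++ tail) [] 0 ret' := by
                simp only [List.drop_zero, List.take_zero]
                conv_rhs => rw [hdec]
                simp only [List.append_assoc]
                rw [pvLoopB_ws_skip w _ 0 ret' hw]
        · -- no cut: advance the index
          rw [if_neg hu0, if_neg hu0]
          exact ih t (i + 1) _ ret tail (by omega) (by omega) hws (fun _ => hu0) hh
      · -- i = t.length with t ≠ []: Python A raises (outside Pre_); both ports return ret
        have hge : t.length ≤ i := by omega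
        rw [pvLoopA_oob t i u ret ht hge, List.drop_of_length_le hge, List.nil_append,
          pvLoopB_ws_tail tail _ u ret hws (hu (by
            rcases hte : t with _ | ⟨a, b⟩
            · exact absurd hte ht
            · subst hte; simp at hge ⊢; omega))]

-- top-level bridge: B's pass over the raw text equals A's loop over the stripped text
theorem pvTop (s : List Char) (ret : List String) :
    pvLoopA (PySem.Chars.strip s) 0 0 ret = pvLoopB s [] 0 ret := by
  obtain ⟨w, w2, hdec, hw, hw2⟩ := pvStrip_decomp s
  have := pvMain ((PySem.Chars.strip s).length + w2.length) (PySem.Chars.strip s) 0 0 ret w2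
    (by omega) (by omega) hw2 (by omega) (fun c hc => pvStrip_head s c hc)
  rw [this]
  simp only [List.drop_zero, List.take_zero]
  conv_rhs => rw [hdec]
  simp only [List.append_assoc]
  rw [pvLoopB_ws_skip w _ 0 ret hw]

-- ===== VERDICT (by name: the statement is the Claim_ definition above) =====
theorem splitjsons_spec : Claim_equal_splitjsons := by
  intro text _ _
  unfold Spec_splitjsons splitjsons splitjsons_alt
  exact pvTop text.toList []
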